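-- pv_equiv track=rewrite | github.com/byronaltice/MewgenicsBreedingManager | src/breed_priority.py | _rank_colors
-- ===== SOURCE A (Python) =====
-- CLR_DESIRABLE  = "#6aaa6a"
--
-- CLR_UNDESIRABLE = "#aa6a6a"
--
-- def _rank_colors(score_map: dict) -> dict:
--     """Map categorical labels to display colors by relative rank.
--
--     score_map: {label: score_value}
--
--     Rules:
--       - 3 distinct values: highest=green, middle=grey, lowest=red
--       - 2 distinct values: highest=green, lower=grey  (no red - tied pair)
--       - 1 distinct value : all grey  (3-way tie)
--     """
--     unique = sorted(set(score_map.values()), reverse=True)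
--     result = {}
--     for label, score in score_map.items():
--         if len(unique) == 1:
--             result[label] = "#888888"
--         elif len(unique) == 2:
--             result[label] = CLR_DESIRABLE if score == unique[0] else "#888888"
--         else:
--             if score == unique[0]:
--                 result[label] = CLR_DESIRABLE
--             elif score == unique[-1]:
--                 result[label] = CLR_UNDESIRABLE
--             else:
--                 result[label] = "#888888"
--     return result
-- ===== SOURCE B (Python) =====
-- CLR_DESIRABLE  = "#6aaa6a"
--
-- CLR_UNDESIRABLE = "#aa6a6a"
--
-- def _rank_colors(score_map: dict) -> dict:
--     """Linear passes over the values (max, min, any-middle) instead of sorting the distinct values."""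
--     if not score_map:
--         return {}
--     vals = score_map.values()
--     mx = max(vals)
--     mn = min(vals)
--     if mx == mn:
--         return {label: "#888888" for label in score_map}
--     if not any(mn < v < mx for v in vals):
--         return {label: (CLR_DESIRABLE if v == mx else "#888888")
--                 for label, v in score_map.items()}
--     return {label: (CLR_DESIRABLE if v == mx else CLR_UNDESIRABLE if v == mn else "#888888")
--             for label, v in score_map.items()}
-- ===== Notes on version B (the rewrite author's own statement) =====
-- stated objective: alternative
-- what changed: B drops the sort of the deduplicated value set and instead makes plain linear passes over the values (max, min, and whether any strictly-middle value exists) to pick each label's color.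
import Mathlib
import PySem

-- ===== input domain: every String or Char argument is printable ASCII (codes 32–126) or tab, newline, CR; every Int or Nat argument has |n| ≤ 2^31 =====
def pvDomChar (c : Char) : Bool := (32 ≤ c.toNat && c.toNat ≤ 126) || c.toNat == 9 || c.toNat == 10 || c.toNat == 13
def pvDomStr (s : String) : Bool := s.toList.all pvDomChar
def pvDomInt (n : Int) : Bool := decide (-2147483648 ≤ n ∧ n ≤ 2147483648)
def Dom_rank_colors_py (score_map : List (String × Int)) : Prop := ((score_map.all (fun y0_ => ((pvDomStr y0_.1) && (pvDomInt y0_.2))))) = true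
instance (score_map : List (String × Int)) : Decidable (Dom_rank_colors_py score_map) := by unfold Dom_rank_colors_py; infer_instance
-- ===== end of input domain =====

-- B replaces A's sort of the distinct score values by plain linear passes computing the
-- maximum, the minimum and whether any strictly-middle value exists (objective: alternative).

-- ===== PORT A =====
-- unique = sorted(set(score_map.values()), reverse=True); then one pass building the result dict
def rank_colors_py (score_map : List (String × Int)) : List (String × String) :=
  let unique := PySem.List.sorted (PySem.Set.ofList (score_map.map (fun p => p.2))) (fun x => x) true
  (score_map.foldl (fun (r : PySem.Dict String String) lv =>
      if unique.length = 1 then r.insert lv.1 "#888888"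
      else if unique.length = 2 then
        r.insert lv.1 (if lv.2 = PySem.List.pyGetD unique 0 0 then "#6aaa6a" else "#888888")
      else
        if lv.2 = PySem.List.pyGetD unique 0 0 then r.insert lv.1 "#6aaa6a"
        else if lv.2 = PySem.List.pyGetD unique (-1) 0 then r.insert lv.1 "#aa6a6a"
        else r.insert lv.1 "#888888")
    PySem.Dict.empty).items

-- ===== PORT B =====
def rank_colors_py_alt (score_map : List (String × Int)) : List (String × String) :=
  if score_map.isEmpty then []
  else
    let vals := score_map.map (fun p => p.2)
    let mx := (PySem.List.max? vals (fun x => x)).getD 0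
    let mn := (PySem.List.min? vals (fun x => x)).getD 0
    if mx = mn then
      (score_map.foldl (fun (r : PySem.Dict String String) lv => r.insert lv.1 "#888888")
        PySem.Dict.empty).items
    else if vals.any (fun v => decide (mn < v ∧ v < mx)) = false then
      (score_map.foldl (fun (r : PySem.Dict String String) lv =>
          r.insert lv.1 (if lv.2 = mx then "#6aaa6a" else "#888888"))
        PySem.Dict.empty).items
    else
      (score_map.foldl (fun (r : PySem.Dict String String) lv =>
          r.insert lv.1 (if lv.2 = mx then "#6aaa6a" else if lv.2 = mn then "#aa6a6a" else "#888888"))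
        PySem.Dict.empty).items


-- ===== PRECONDITION & SPEC =====
def Spec_rank_colors_py (score_map : List (String × Int)) (out : List (String × String)) : Prop := out = rank_colors_py_alt score_map
instance (score_map : List (String × Int)) (out : List (String × String)) : Decidable (Spec_rank_colors_py score_map out) := by unfold Spec_rank_colors_py; infer_instance

-- ===== CLAIM (what is proved, stated in full; the proofs are below) =====
def Claim_equal_rank_colors_py : Prop := ∀ (score_map : List (String × Int)), Dom_rank_colors_py score_map → Spec_rank_colors_py score_map (rank_colors_py score_map)

-- ===== LEMMAS AND PROOFS =====

theorem nodup_len_le (l u : List Int) (hl : l.Nodup) (hs : l ⊆ u) : l.length ≤ u.length := by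
  have h1 : l.toFinset.card = l.length := List.toFinset_card_of_nodup hl
  have h2 : l.toFinset ⊆ u.toFinset := by
    intro x hx; simp only [List.mem_toFinset] at *; exact hs hx
  have h3 : u.toFinset.card ≤ u.length := u.toFinset_card_le
  have := Finset.card_le_card h2
  omega

theorem pyGetD_zero {α : Type} (x : α) (t : List α) (d : α) :
    PySem.List.pyGetD (x :: t) 0 d = x := by
  simp [PySem.List.pyGetD]

theorem pyGetD_neg_one {α : Type} (l : List α) (h : l ≠ []) (d : α) :
    PySem.List.pyGetD l (-1) d = l.getLast h := by
  have hn : 0 < l.length := List.length_pos_iff.mpr h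
  have h1 : PySem.List.pyIdx? l.length (-1) = some (l.length - 1) := by
    simp [PySem.List.pyIdx?]; omega
  rw [PySem.List.pyGetD, PySem.List.pyGet?, h1]
  simp [List.getLast_eq_getElem, List.getElem?_eq_getElem (by omega : l.length - 1 < l.length)]

theorem key_facts (vals : List Int) (hv : vals ≠ []) (mx mn : Int)
    (hmx : PySem.List.max? vals (fun x => x) = some mx)
    (hmn : PySem.List.min? vals (fun x => x) = some mn) :
    PySem.List.pyGetD (PySem.List.sorted (PySem.Set.ofList vals) (fun x => x) true) 0 0 = mx ∧
    PySem.List.pyGetD (PySem.List.sorted (PySem.Set.ofList vals) (fun x => x) true) (-1) 0 = mn ∧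
    ((PySem.List.sorted (PySem.Set.ofList vals) (fun x => x) true).length = 1 ↔ mx = mn) ∧
    (3 ≤ (PySem.List.sorted (PySem.Set.ofList vals) (fun x => x) true).length ↔
      ∃ v ∈ vals, mn < v ∧ v < mx) := by
  set u := PySem.List.sorted (PySem.Set.ofList vals) (fun x => x) true with hu
  have hperm : u.Perm (PySem.Set.ofList vals) := PySem.List.sorted_perm _ _ _
  have hnd : u.Nodup := (hperm.nodup_iff).mpr (PySem.Set.nodup_ofList vals)
  have hmem : ∀ x, x ∈ u ↔ x ∈ vals := fun x =>
    (PySem.List.mem_sorted _ _ _ _).trans (PySem.Set.mem_ofList vals x)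
  have hpw : u.Pairwise (fun a b => b ≤ a) := PySem.List.sorted_pairwise_rev _ _
  have hune : u ≠ [] := by
    rw [hu, Ne, PySem.List.sorted_eq_nil_iff]
    intro h
    obtain ⟨x, t, rfl⟩ := List.exists_cons_of_ne_nil hv
    have : x ∈ PySem.Set.ofList (x :: t) := (PySem.Set.mem_ofList _ _).mpr (List.mem_cons_self)
    simp [h] at this
  have hmxv : mx ∈ vals := PySem.List.max?_mem hmx
  have hmax : ∀ y ∈ vals, y ≤ mx := PySem.List.max?_isMax hmx
  have hmnv : mn ∈ vals := PySem.List.min?_mem hmn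
  have hmin : ∀ y ∈ vals, mn ≤ y := PySem.List.min?_isMin hmn
  obtain ⟨h, t, hut⟩ := List.exists_cons_of_ne_nil hune
  have hh : h = mx := by
    have h1 : h ∈ vals := (hmem h).1 (hut ▸ List.mem_cons_self)
    have h2 : ∀ y ∈ PySem.Set.ofList vals, y ≤ h :=
      PySem.List.key_head_sorted_rev_ge _ (fun x => x) (hu ▸ hut)
    exact le_antisymm (hmax h h1) (h2 mx ((PySem.Set.mem_ofList vals mx).mpr hmxv))
  have hrevne : u.reverse ≠ [] := by simpa using hune
  obtain ⟨g, t', hrevt⟩ := List.exists_cons_of_ne_nil hrevne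
  have hrevpw : u.reverse.Pairwise (fun a b => a ≤ b) := (List.pairwise_reverse).mpr hpw
  have hgle : ∀ y ∈ u, g ≤ y := by
    intro y hy
    have hy' : y ∈ u.reverse := by simpa using hy
    rw [hrevt] at hy'
    rcases List.mem_cons.mp hy' with rfl | hmem'
    · exact le_refl y
    · exact (List.pairwise_cons.mp (hrevt ▸ hrevpw)).1 y hmem'
  have hgmem : g ∈ u := by
    have : g ∈ u.reverse := hrevt ▸ List.mem_cons_self
    simpa using this
  have hg : g = mn :=
    le_antisymm (hgle mn ((hmem mn).mpr hmnv)) (hmin g ((hmem g).1 hgmem))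
  have hlast : u.getLast hune = g := by
    rw [List.getLast_eq_head_reverse]
    simp only [hrevt, List.head_cons]
  refine ⟨?_, ?_, ?_, ?_⟩
  · rw [hut, pyGetD_zero, hh]
  · rw [pyGetD_neg_one u hune, hlast, hg]
  · constructor
    · intro h1
      rw [hut] at h1
      simp only [List.length_cons] at h1
      have ht : t = [] := List.eq_nil_of_length_eq_zero (by omega)
      have hmnu : mn ∈ u := (hmem mn).mpr hmnv
      rw [hut, ht] at hmnu
      simp at hmnu
      rw [← hh, hmnu]
    · intro heq
      cases t with
      | nil => rw [hut]; rfl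
      | cons b t2 =>
        exfalso
        have hbu : b ∈ u := by rw [hut]; simp
        have hbv : b ∈ vals := (hmem b).1 hbu
        have hb : b = mx := le_antisymm (hmax b hbv) (heq ▸ hmin b hbv)
        have := hut ▸ hnd
        rw [List.nodup_cons] at this
        exact this.1 (by rw [hh, ← hb]; exact List.mem_cons_self)
  · constructor
    · intro h3
      cases t with
      | nil => rw [hut] at h3; simp at h3
      | cons m rest =>
        cases rest with
        | nil => rw [hut] at h3; simp at h3
        | cons c r2 =>
          have hmu : m ∈ u := by rw [hut]; simp
          have hmv : m ∈ vals := (hmem m).1 hmu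
          have hnd' := hut ▸ hnd
          rw [List.nodup_cons] at hnd'
          have hndt := hnd'.2
          rw [List.nodup_cons] at hndt
          -- m < mx
          have hmle : m ≤ h := (List.pairwise_cons.mp (hut ▸ hpw)).1 m (by simp)
          have hmne : h ≠ m := fun he => hnd'.1 (he ▸ List.mem_cons_self)
          have hmlt : m < mx := hh ▸ lt_of_le_of_ne hmle (fun he => hmne he.symm)
          -- mn < m  (via the next element c: mn ≤ c < m)
          have hcu : c ∈ u := by rw [hut]; simp
          have hcv : c ∈ vals := (hmem c).1 hcu
          have hcle : c ≤ m := (List.pairwise_cons.mp (List.pairwise_cons.mp (hut ▸ hpw)).2).1 c (by simp)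
          refine ⟨m, hmv, ?_, hmlt⟩
          have hcm : c < m := lt_of_le_of_ne hcle (fun he => hndt.1 (he ▸ List.mem_cons_self))
          exact lt_of_le_of_lt (hmin c hcv) hcm
    · rintro ⟨v, hvm, hlo, hhi⟩
      have hsub : [mx, v, mn] ⊆ u := by
        intro x hx
        simp only [List.mem_cons, List.not_mem_nil, or_false] at hx
        rcases hx with rfl | rfl | rfl
        · exact (hmem x).mpr hmxv
        · exact (hmem x).mpr hvm
        · exact (hmem x).mpr hmnv
      have h12 : mx ≠ v := ne_of_gt hhi
      have h13 : mx ≠ mn := ne_of_gt (lt_trans hlo hhi)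
      have h23 : v ≠ mn := ne_of_gt hlo
      have hnd3 : ([mx, v, mn] : List Int).Nodup := by
        simp [h12, h13, h23]
      have := nodup_len_le [mx, v, mn] u hnd3 hsub
      simpa using this

theorem main_equiv : ∀ (sm : List (String × Int)), rank_colors_py sm = rank_colors_py_alt sm := by
  intro sm
  cases hsm : sm with
  | nil => rfl
  | cons hd tl =>
    unfold rank_colors_py rank_colors_py_alt
    have hv : (hd :: tl).map (fun p => p.2) ≠ [] := by simp
    obtain ⟨mx, hmxo⟩ : ∃ m, PySem.List.max? ((hd :: tl).map (fun p => p.2)) (fun x => x) = some m := by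
      cases h : PySem.List.max? ((hd :: tl).map (fun p => p.2)) (fun x => x) with
      | none => exact absurd ((PySem.List.max?_eq_none_iff _ _).mp h) hv
      | some m => exact ⟨m, rfl⟩
    obtain ⟨mn, hmno⟩ : ∃ m, PySem.List.min? ((hd :: tl).map (fun p => p.2)) (fun x => x) = some m := by
      cases h : PySem.List.min? ((hd :: tl).map (fun p => p.2)) (fun x => x) with
      | none => exact absurd ((PySem.List.min?_eq_none_iff _ _).mp h) hv
      | some m => exact ⟨m, rfl⟩
    obtain ⟨G1, G2, G3, G4⟩ := key_facts _ hv mx mn hmxo hmno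
    have hupos : 0 < (PySem.List.sorted (PySem.Set.ofList ((hd :: tl).map (fun p => p.2))) (fun x => x) true).length := by
      rw [PySem.List.length_sorted]
      have : hd.2 ∈ PySem.Set.ofList ((hd :: tl).map (fun p => p.2)) := by
        rw [PySem.Set.mem_ofList]; simp
      exact List.length_pos_of_mem this
    simp only [List.isEmpty_cons, Bool.false_eq_true, if_false, hmxo, hmno, Option.getD_some]
    by_cases hc1 : mx = mn
    · have hlen1 := G3.mpr hc1
      simp only [hlen1, if_pos hc1]
      simp
    · have hlen1 : ¬ ((PySem.List.sorted (PySem.Set.ofList ((hd :: tl).map (fun p => p.2))) (fun x => x) true).length = 1) :=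
        fun h => hc1 (G3.mp h)
      by_cases hc2 : ∃ v ∈ (hd :: tl).map (fun p => p.2), mn < v ∧ v < mx
      · have hlen3 := G4.mpr hc2
        have hany : ((hd :: tl).map (fun p => p.2)).any (fun v => decide (mn < v ∧ v < mx)) = true := by
          rw [List.any_eq_true]
          obtain ⟨v, hvm, hv1, hv2⟩ := hc2
          exact ⟨v, hvm, by simp [hv1, hv2]⟩
        have hlen2 : ¬ ((PySem.List.sorted (PySem.Set.ofList ((hd :: tl).map (fun p => p.2))) (fun x => x) true).length = 2) := by omega
        simp only [hlen1, hlen2, if_false, if_neg hc1, hany, Bool.true_eq_false, G1, G2]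
        refine congrArg _ (PySem.List.foldl_congr_mem _ _ _ _ ?_)
        intro acc x hx
        split_ifs <;> rfl
      · have hlen3 : ¬ (3 ≤ (PySem.List.sorted (PySem.Set.ofList ((hd :: tl).map (fun p => p.2))) (fun x => x) true).length) :=
          fun h => hc2 (G4.mp h)
        have hlen2 : (PySem.List.sorted (PySem.Set.ofList ((hd :: tl).map (fun p => p.2))) (fun x => x) true).length = 2 := by omega
        have hany : ((hd :: tl).map (fun p => p.2)).any (fun v => decide (mn < v ∧ v < mx)) = false := by
          rw [List.any_eq_false]
          intro v hvm
          simp only [decide_eq_true_eq]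
          intro hcon
          exact hc2 ⟨v, hvm, hcon.1, hcon.2⟩
        simp only [hlen2, if_neg hc1, hany, G1]
        norm_num

-- ===== VERDICT (by name: the statement is the Claim_ definition above) =====
theorem rank_colors_py_spec : Claim_equal_rank_colors_py := by
  intro sm _dom
  unfold Spec_rank_colors_py
  exact main_equiv sm
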